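-- pv_equiv track=rewrite | github.com/linh-phuong/coursera-ucsd-bioinfo-2 | week2/euler_readpair.py | PairCompositionGraph
-- ===== SOURCE A (Python) =====
-- def PairCompositionGraph(pairs):
--     pair_graph = dict()
--     for p in pairs:
--         key = (p[0][:-1], p[1][:-1])
--         value = (p[0][1:], p[1][1:])
--         if key not in pair_graph:
--             pair_graph[key] = [value]
--         else:
--             pair_graph[key].append(value)
--     return pair_graph
-- ===== SOURCE B (Python) =====
-- def PairCompositionGraph(pairs):
--     # dedup keys in first-occurrence order, then one filtering scan per distinct key
--     keys = list(dict.fromkeys((p[0][:-1], p[1][:-1]) for p in pairs))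
--     return {k: [(p[0][1:], p[1][1:]) for p in pairs
--                 if (p[0][:-1], p[1][:-1]) == k]
--             for k in keys}
-- ===== Notes on version B (the rewrite author's own statement) =====
-- stated objective: alternative
-- what changed: Replaces the incremental hash-dict grouping pass (insert-or-append per element) with an ordered dedup of the keys followed by one filtering scan of the input per distinct key.
import Mathlib
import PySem

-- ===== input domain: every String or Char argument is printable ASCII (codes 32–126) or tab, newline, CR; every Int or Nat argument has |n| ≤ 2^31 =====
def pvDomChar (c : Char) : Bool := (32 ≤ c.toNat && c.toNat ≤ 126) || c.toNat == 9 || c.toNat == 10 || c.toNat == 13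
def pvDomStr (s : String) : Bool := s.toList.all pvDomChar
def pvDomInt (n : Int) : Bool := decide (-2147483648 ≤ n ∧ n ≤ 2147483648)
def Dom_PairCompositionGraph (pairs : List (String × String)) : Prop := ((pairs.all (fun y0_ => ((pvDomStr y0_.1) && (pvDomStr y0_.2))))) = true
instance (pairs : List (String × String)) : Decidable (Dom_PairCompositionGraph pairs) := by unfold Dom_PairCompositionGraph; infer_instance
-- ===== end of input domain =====

-- B replaces A's incremental dict-grouping pass by an ordered key-dedup plus one filtering scan per distinct key (alternative decomposition, not faster).


-- ===== PORT A =====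
def PairCompositionGraph (pairs : List (String × String)) : List (String × String × List (String × String)) :=
  let pair_graph : PySem.Dict (String × String) (List (String × String)) :=
    pairs.foldl (fun d p =>
      let key := (PySem.Str.slice p.1 none (some (-1)), PySem.Str.slice p.2 none (some (-1)))
      let value := (PySem.Str.slice p.1 (some 1) none, PySem.Str.slice p.2 (some 1) none)
      if !(d.contains key) then d.insert key [value]
      else d.modify key [] (fun l => l ++ [value]))   -- pair_graph[key].append(value)
      PySem.Dict.empty
  pair_graph.items.map (fun it => (it.1.1, it.1.2, it.2))

-- ===== PORT B =====
def PairCompositionGraph_alt (pairs : List (String × String)) : List (String × String × List (String × String)) :=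
  let key := fun p : String × String =>
    (PySem.Str.slice p.1 none (some (-1)), PySem.Str.slice p.2 none (some (-1)))
  let keys := PySem.List.dedup (pairs.map key)       -- dict.fromkeys(...) as ordered dedup
  keys.map (fun k =>
    (k.1, k.2,
      (pairs.filter (fun p => key p == k)).map
        (fun p => (PySem.Str.slice p.1 (some 1) none, PySem.Str.slice p.2 (some 1) none))))

-- ===== PRECONDITION & SPEC =====
def Spec_PairCompositionGraph (pairs : List (String × String)) (out : List (String × String × List (String × String))) : Prop := out = PairCompositionGraph_alt pairs
instance (pairs : List (String × String)) (out : List (String × String × List (String × String))) : Decidable (Spec_PairCompositionGraph pairs out) := by unfold Spec_PairCompositionGraph; infer_instance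

-- ===== CLAIM (what is proved, stated in full; the proofs are below) =====
def Claim_equal_PairCompositionGraph : Prop := ∀ (pairs : List (String × String)), Dom_PairCompositionGraph pairs → Spec_PairCompositionGraph pairs (PairCompositionGraph pairs)

-- ===== LEMMAS AND PROOFS =====

def pvKey (p : String × String) : String × String :=
  (PySem.Str.slice p.1 none (some (-1)), PySem.Str.slice p.2 none (some (-1)))

def pvVal (p : String × String) : String × String :=
  (PySem.Str.slice p.1 (some 1) none, PySem.Str.slice p.2 (some 1) none)

-- A's insert-or-append branch is exactly Python's d[key] = f(d.get(key, [])) in both cases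
theorem pvStep_eq_modify (d : PySem.Dict (String × String) (List (String × String)))
    (p : String × String) :
    (if !(d.contains (pvKey p)) then d.insert (pvKey p) [pvVal p]
     else d.modify (pvKey p) [] (fun l => l ++ [pvVal p]))
    = d.modify (pvKey p) [] (fun l => l ++ [pvVal p]) := by
  by_cases h : d.contains (pvKey p)
  · simp [h]
  · simp only [Bool.not_eq_true] at h
    simp [h, PySem.Dict.modify, PySem.Dict.getD_of_not_contains d [] h]

theorem pvGraph_eq :
    ∀ (pairs : List (String × String)),
      PairCompositionGraph pairs = PairCompositionGraph_alt pairs := by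
  intro pairs
  unfold PairCompositionGraph PairCompositionGraph_alt
  simp only []
  have hfold :
      pairs.foldl (fun d p =>
        if !(d.contains (pvKey p)) then d.insert (pvKey p) [pvVal p]
        else d.modify (pvKey p) [] (fun l => l ++ [pvVal p])) PySem.Dict.empty
      = pairs.foldl (fun d p => d.modify (pvKey p) [] (fun l => l ++ [pvVal p]))
          PySem.Dict.empty :=
    PySem.List.foldl_congr_mem pairs _ _ _ (fun d p _ => pvStep_eq_modify d p)
  show (pairs.foldl (fun d p =>
        if !(d.contains (pvKey p)) then d.insert (pvKey p) [pvVal p]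
        else d.modify (pvKey p) [] (fun l => l ++ [pvVal p])) PySem.Dict.empty).items.map
          (fun it => (it.1.1, it.1.2, it.2))
      = (PySem.List.dedup (pairs.map pvKey)).map (fun k =>
          (k.1, k.2, (pairs.filter (fun p => pvKey p == k)).map pvVal))
  rw [hfold]
  set g := pairs.foldl (fun d p => d.modify (pvKey p) [] (fun l => l ++ [pvVal p]))
      PySem.Dict.empty with hg
  have hnodup : g.keys.Nodup := by
    apply PySem.Dict.nodup_keys_foldl_modify_key pairs pvKey []
      (fun _ p => fun l => l ++ [pvVal p]) PySem.Dict.empty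
    simp [PySem.Dict.keys_empty]
  have hkeys : g.keys = PySem.Set.ofList (pairs.map pvKey) := by
    rw [hg, PySem.Dict.keys_foldl_modify_key pairs pvKey []
      (fun _ p => fun l => l ++ [pvVal p]) PySem.Dict.empty]
    rfl
  have hgetD : ∀ k, g.getD k [] = (pairs.filter (fun p => pvKey p == k)).map pvVal := by
    intro k
    have h := PySem.Dict.getD_foldl_modify_append
      (pairs.map (fun p => (pvKey p, pvVal p))) PySem.Dict.empty k
    rw [List.foldl_map] at h
    simp only [PySem.Dict.getD_empty, List.nil_append] at h
    rw [hg]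
    rw [h]
    rw [List.filter_map]
    simp [List.map_map, Function.comp_def]
  rw [PySem.Dict.items_eq_map_keys g hnodup [], hkeys]
  rw [List.map_map]
  unfold PySem.List.dedup
  apply List.map_congr_left
  intro k _
  simp [hgetD k]

-- ===== VERDICT (by name: the statement is the Claim_ definition above) =====
theorem PairCompositionGraph_spec : Claim_equal_PairCompositionGraph := by
  intro pairs _
  unfold Spec_PairCompositionGraph
  exact pvGraph_eq pairs
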